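-- pv_equiv track=rewrite | github.com/DataBiosphere/wdl-conformance-tests | lib.py | generate_change_container_specifier
-- ===== SOURCE A (Python) =====
-- def generate_change_container_specifier(lines, to_replace="container", replace_with="docker"):
--     """
--     Generator to change the container specifier from WDL 1.1+ to a docker specifier for WDL 1.0 and draft-2
--     ex:
--     runtime {
--         container: ubuntu:latest
--     }
--     turns into
--     runtime {
--         docker: ubuntu:latest
--     }
--     This gets around cromwell not supporting the container specifier. WDL 2.0 will remove the docker specifier,
--     so this can also be used in the future.
--     This requires a specifically formatted runtime section, similar to the command section generator
--     """
--     iterator = iter(lines)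
--     in_runtime = False
--     for line in iterator:
--         if in_runtime is False:
--             if line.strip() == "runtime {":
--                 in_runtime = True
--             yield line
--         else:
--             i = line.find(to_replace)
--             if line.strip() == "}":
--                 in_runtime = False
--             if i > 0:
--                 yield line[:i] + replace_with + line[i + len(to_replace):]
--             else:
--                 yield line
-- ===== SOURCE B (Python) =====
-- def _split_at(pred, xs):
--     # Split xs at the first element satisfying pred: (prefix, that element, suffix).
--     for j, x in enumerate(xs):
--         if pred(x):
--             return xs[:j], x, xs[j + 1:]
--     return xs, None, None
--
--
-- def generate_change_container_specifier(lines, to_replace="container", replace_with="docker"):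
--     # Segment-splitting decomposition: repeatedly cut the line list at the
--     # "runtime {" marker, then cut again at the closing "}", and substitute
--     # only inside the extracted block segment (closing line included).
--     rest = list(lines)
--     while True:
--         pre, opener, rest = _split_at(lambda l: l.strip() == "runtime {", rest)
--         yield from pre
--         if opener is None:
--             return
--         yield opener
--         body, closer, rest = _split_at(lambda l: l.strip() == "}", rest)
--         if closer is not None:
--             body = body + [closer]
--         else:
--             rest = []
--         for line in body:
--             i = line.find(to_replace)
--             yield line[:i] + replace_with + line[i + len(to_replace):] if i > 0 else line
-- ===== Notes on version B (the rewrite author's own statement) =====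
-- stated objective: alternative
-- what changed: Replaces A's per-line state-machine loop with a segment-splitting algorithm: the line list is repeatedly cut at the 'runtime {' marker and again at the closing '}', and substitution is mapped over the extracted block segment only.
import Mathlib
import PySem

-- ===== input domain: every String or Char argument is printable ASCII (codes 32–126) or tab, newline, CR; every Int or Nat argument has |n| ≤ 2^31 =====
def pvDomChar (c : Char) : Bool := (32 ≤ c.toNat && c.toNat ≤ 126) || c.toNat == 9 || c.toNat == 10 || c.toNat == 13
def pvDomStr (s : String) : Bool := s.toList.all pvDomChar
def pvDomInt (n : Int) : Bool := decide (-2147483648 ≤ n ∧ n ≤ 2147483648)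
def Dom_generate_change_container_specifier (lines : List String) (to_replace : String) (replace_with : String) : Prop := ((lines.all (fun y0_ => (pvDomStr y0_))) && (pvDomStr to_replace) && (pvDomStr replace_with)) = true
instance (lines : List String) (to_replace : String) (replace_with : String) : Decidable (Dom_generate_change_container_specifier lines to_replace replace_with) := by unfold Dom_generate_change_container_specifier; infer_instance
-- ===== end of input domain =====

-- B replaces A's per-line state-machine loop with a segment-splitting algorithm (cut at markers, map the substitution over block segments); same cost.

-- ===== PORT A =====
-- single fold over the lines carrying (output so far, in_runtime flag), exactly A's loop
def generate_change_container_specifier (lines : List String) (to_replace : String) (replace_with : String) : List String :=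
  (lines.foldl (fun (st : List String × Bool) line =>
    if st.2 = false then
      (st.1 ++ [line], if PySem.Str.strip line == "runtime {" then true else st.2)
    else
      let i := PySem.Str.find line to_replace
      let inR' := if PySem.Str.strip line == "}" then false else st.2
      if i > 0 then
        (st.1 ++ [String.ofList (PySem.List.slice line.toList none (some i) ++
            replace_with.toList ++
            PySem.List.slice line.toList (some (i + (PySem.Str.len to_replace : Int))) none)], inR')
      else
        (st.1 ++ [line], inR')) (([] : List String), false)).1

-- ===== PORT B =====
-- _split_at: split at the first element satisfying pred → (prefix, that element with suffix / none)
def pvSplitAt (p : String → Bool) : List String → List String × Option (String × List String)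
  | [] => ([], none)
  | x :: xs =>
      if p x then ([], some (x, xs))
      else
        let r := pvSplitAt p xs
        (x :: r.1, r.2)

theorem pvSplitAt_rest_lt (p : String → Bool) : ∀ (ls pre rest : List String) (x : String),
    pvSplitAt p ls = (pre, some (x, rest)) → rest.length < ls.length := by
  intro ls
  induction ls with
  | nil => intro pre rest x h; simp [pvSplitAt] at h
  | cons a as ih =>
    intro pre rest x h
    by_cases hp : p a = true
    · simp [pvSplitAt, hp] at h
      simp [h.2.2]
    · rcases hs : pvSplitAt p as with ⟨pre', r⟩
      simp only [pvSplitAt, hp, Bool.false_eq_true, ite_false, hs] at h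
      cases r with
      | none => simp at h
      | some v =>
        rcases v with ⟨x', rest'⟩
        have hlen := ih pre' rest' x' (by rw [hs])
        simp at h
        rcases h with ⟨-, -, hr⟩
        subst hr
        simp; omega

-- the substitution applied to a line inside a runtime block
def pvSubst (to_replace replace_with : String) (line : String) : String :=
  let i := PySem.Str.find line to_replace
  if i > 0 then
    String.ofList (PySem.List.slice line.toList none (some i) ++
      replace_with.toList ++
      PySem.List.slice line.toList (some (i + (PySem.Str.len to_replace : Int))) none)
  else line

-- while loop of B: cut at "runtime {", then at "}", substitute over the block segment, repeat
def pvAltGo (to_replace replace_with : String) (ls : List String) : List String :=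
  match h1 : pvSplitAt (fun l => PySem.Str.strip l == "runtime {") ls with
  | (pre, none) => pre
  | (pre, some (opener, rest1)) =>
      match h2 : pvSplitAt (fun l => PySem.Str.strip l == "}") rest1 with
      | (body, none) => pre ++ opener :: body.map (pvSubst to_replace replace_with)
      | (body, some (closer, rest2)) =>
          pre ++ opener :: ((body ++ [closer]).map (pvSubst to_replace replace_with) ++
            pvAltGo to_replace replace_with rest2)
termination_by ls.length
decreasing_by
  exact Nat.lt_trans (pvSplitAt_rest_lt _ _ _ _ _ h2) (pvSplitAt_rest_lt _ _ _ _ _ h1)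

def generate_change_container_specifier_alt (lines : List String) (to_replace : String) (replace_with : String) : List String :=
  pvAltGo to_replace replace_with lines

-- ===== PRECONDITION & SPEC =====
def Spec_generate_change_container_specifier (lines : List String) (to_replace : String) (replace_with : String) (out : List String) : Prop := out = generate_change_container_specifier_alt lines to_replace replace_with
instance (lines : List String) (to_replace : String) (replace_with : String) (out : List String) : Decidable (Spec_generate_change_container_specifier lines to_replace replace_with out) := by unfold Spec_generate_change_container_specifier; infer_instance

-- ===== CLAIM (what is proved, stated in full; the proofs are below) =====
def Claim_equal_generate_change_container_specifier : Prop := ∀ (lines : List String) (to_replace : String) (replace_with : String), Dom_generate_change_container_specifier lines to_replace replace_with → Spec_generate_change_container_specifier lines to_replace replace_with (generate_change_container_specifier lines to_replace replace_with)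

-- ===== LEMMAS AND PROOFS =====
-- proof-side model of A: the state machine written as two mutually recursive passes
mutual
def pvAltOuter (to_replace : String) (replace_with : String) : List String → List String
  | [] => []
  | line :: rest =>
      line :: (if PySem.Str.strip line == "runtime {" then
                 pvAltInner to_replace replace_with rest
               else
                 pvAltOuter to_replace replace_with rest)
def pvAltInner (to_replace : String) (replace_with : String) : List String → List String
  | [] => []
  | line :: rest =>
      pvSubst to_replace replace_with line ::
        (if PySem.Str.strip line == "}" then pvAltOuter to_replace replace_with rest
         else pvAltInner to_replace replace_with rest)
end

-- loop invariant: A's fold from state (acc, b) produces acc ++ (inner if b else outer)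
theorem pvFold_eq (to_replace replace_with : String) :
    ∀ (lines : List String) (acc : List String) (b : Bool),
      (lines.foldl (fun (st : List String × Bool) line =>
        if st.2 = false then
          (st.1 ++ [line], if PySem.Str.strip line == "runtime {" then true else st.2)
        else
          let i := PySem.Str.find line to_replace
          let inR' := if PySem.Str.strip line == "}" then false else st.2
          if i > 0 then
            (st.1 ++ [String.ofList (PySem.List.slice line.toList none (some i) ++
                replace_with.toList ++
                PySem.List.slice line.toList (some (i + (PySem.Str.len to_replace : Int))) none)], inR')
          else
            (st.1 ++ [line], inR')) (acc, b)).1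
      = acc ++ (if b then pvAltInner to_replace replace_with lines
                else pvAltOuter to_replace replace_with lines) := by
  intro lines
  induction lines with
  | nil => intro acc b; cases b <;> simp [pvAltInner, pvAltOuter]
  | cons line rest ih =>
    intro acc b
    cases b with
    | false =>
      simp only [List.foldl_cons]
      rw [ih]
      by_cases h : (PySem.Str.strip line == "runtime {") = true <;>
        simp [pvAltOuter, h]
    | true =>
      simp only [List.foldl_cons, if_neg (by decide : ¬ (true = false))]
      by_cases hd : (PySem.Str.strip line == "}") = true <;>
      by_cases hi : PySem.Str.find line to_replace > 0 <;>
        simp only [hd, hi, if_pos, Bool.false_eq_true, ite_false] <;>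
        rw [ih] <;>
        simp [pvAltInner, pvSubst, hd, hi] <;>
        (intro h; simp only [PySem.Str.find_eq] at hi; omega)

-- outer pass characterised by the first split
theorem pvOuter_split (to_replace replace_with : String) : ∀ (ls : List String),
    pvAltOuter to_replace replace_with ls =
      (match pvSplitAt (fun l => PySem.Str.strip l == "runtime {") ls with
       | (pre, none) => pre
       | (pre, some (o, rest)) => pre ++ o :: pvAltInner to_replace replace_with rest) := by
  intro ls
  induction ls with
  | nil => simp [pvAltOuter, pvSplitAt]
  | cons x xs ih =>
    by_cases hp : (PySem.Str.strip x == "runtime {") = true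
    · simp [pvAltOuter, pvSplitAt, hp]
    · simp only [pvAltOuter, pvSplitAt, hp, ite_false, Bool.false_eq_true]
      rw [ih]
      rcases h : pvSplitAt (fun l => PySem.Str.strip l == "runtime {") xs with ⟨pre, r⟩
      cases r with
      | none => simp
      | some v => rcases v with ⟨o, rest⟩; simp

-- inner pass characterised by the second split
theorem pvInner_split (to_replace replace_with : String) : ∀ (ls : List String),
    pvAltInner to_replace replace_with ls =
      (match pvSplitAt (fun l => PySem.Str.strip l == "}") ls with
       | (body, none) => body.map (pvSubst to_replace replace_with)
       | (body, some (c, rest)) =>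
           (body ++ [c]).map (pvSubst to_replace replace_with) ++
             pvAltOuter to_replace replace_with rest) := by
  intro ls
  induction ls with
  | nil => simp [pvAltInner, pvSplitAt]
  | cons x xs ih =>
    by_cases hp : (PySem.Str.strip x == "}") = true
    · simp [pvAltInner, pvSplitAt, hp]
    · simp only [pvAltInner, pvSplitAt, hp, ite_false, Bool.false_eq_true]
      rw [ih]
      rcases h : pvSplitAt (fun l => PySem.Str.strip l == "}") xs with ⟨body, r⟩
      cases r with
      | none => simp
      | some v => rcases v with ⟨c, rest⟩; simp

-- the state machine equals B's segment splitter
theorem pvOuter_eq_go (to_replace replace_with : String) : ∀ (n : ℕ) (ls : List String),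
    ls.length ≤ n → pvAltOuter to_replace replace_with ls = pvAltGo to_replace replace_with ls := by
  intro n
  induction n with
  | zero =>
    intro ls hl
    have : ls = [] := List.eq_nil_of_length_eq_zero (Nat.le_zero.mp hl)
    subst this
    rw [pvAltGo]; simp [pvAltOuter, pvSplitAt]
  | succ n ih =>
    intro ls hl
    rw [pvAltGo, pvOuter_split]
    rcases h1 : pvSplitAt (fun l => PySem.Str.strip l == "runtime {") ls with ⟨pre, r1⟩
    cases r1 with
    | none => simp
    | some v =>
      rcases v with ⟨o, rest1⟩
      simp only
      rw [pvInner_split]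
      rcases h2 : pvSplitAt (fun l => PySem.Str.strip l == "}") rest1 with ⟨body, r2⟩
      cases r2 with
      | none => simp
      | some w =>
        rcases w with ⟨c, rest2⟩
        have hlt1 := pvSplitAt_rest_lt _ _ _ _ _ h1
        have hlt2 := pvSplitAt_rest_lt _ _ _ _ _ h2
        simp [ih rest2 (by omega)]

-- ===== VERDICT (by name: the statement is the Claim_ definition above) =====
theorem generate_change_container_specifier_spec : Claim_equal_generate_change_container_specifier := by
  intro lines to_replace replace_with _
  unfold Spec_generate_change_container_specifier generate_change_container_specifier generate_change_container_specifier_alt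
  rw [pvFold_eq]
  simp [← pvOuter_eq_go to_replace replace_with lines.length lines (le_refl _)]
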